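-- pv_equiv track=rewrite | github.com/bgarnaat/codewars_katas | src/python/5kyu/simple_fun_155_pacman/simple_fun_155_pacman.py | pac_man
-- ===== SOURCE A (Python) =====
-- def pac_man(n, pm, enemies):
--     pm_x, pm_y = pm
--     e_x_low = e_y_low = -1
--     e_x_high = e_y_high = n
--
--     for e in enemies:
--         e_x, e_y = e
--
--         if e_x_low < e_x < pm_x:
--             e_x_low = e_x
--         elif e_x_high > e_x > pm_x:
--             e_x_high = e_x
--
--         if e_y_low < e_y < pm_y:
--             e_y_low = e_y
--         elif e_y_high > e_y > pm_y:
--             e_y_high = e_y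
--
--     return (e_x_high - (e_x_low + 1)) * (e_y_high - (e_y_low + 1)) - 1
-- ===== SOURCE B (Python) =====
-- def pac_man(n, pm, enemies):
--     px, py = pm
--     xl, xh = _bounds(n, px, [x for x, _ in enemies])
--     yl, yh = _bounds(n, py, [y for _, y in enemies])
--     return (xh - (xl + 1)) * (yh - (yl + 1)) - 1
--
--
-- def _bounds(n, c, vals):
--     """Nearest blocked coordinates around c, found by sorting vals once and
--     binary-searching the partition point of c in the sorted array."""
--     vs = sorted(vals)
--     # rightmost partition: number of elements strictly below c
--     lo, hi = 0, len(vs)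
--     while lo < hi:
--         mid = (lo + hi) // 2
--         if vs[mid] < c:
--             lo = mid + 1
--         else:
--             hi = mid
--     low = vs[lo - 1] if lo > 0 else -1
--     # leftmost partition: number of elements <= c
--     lo2, hi2 = 0, len(vs)
--     while lo2 < hi2:
--         mid = (lo2 + hi2) // 2
--         if vs[mid] <= c:
--             lo2 = mid + 1
--         else:
--             hi2 = mid
--     high = vs[lo2] if lo2 < len(vs) else n
--     return max(-1, low), min(n, high)
-- ===== Notes on version B (the rewrite author's own statement) =====
-- stated objective: alternative
-- what changed: A's single fused loop maintaining four mutable extrema is replaced by sorting each coordinate axis once and binary-searching (two hand-written bisection loops per axis) for the nearest enemy coordinates below and above pac-man's position.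
import Mathlib
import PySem

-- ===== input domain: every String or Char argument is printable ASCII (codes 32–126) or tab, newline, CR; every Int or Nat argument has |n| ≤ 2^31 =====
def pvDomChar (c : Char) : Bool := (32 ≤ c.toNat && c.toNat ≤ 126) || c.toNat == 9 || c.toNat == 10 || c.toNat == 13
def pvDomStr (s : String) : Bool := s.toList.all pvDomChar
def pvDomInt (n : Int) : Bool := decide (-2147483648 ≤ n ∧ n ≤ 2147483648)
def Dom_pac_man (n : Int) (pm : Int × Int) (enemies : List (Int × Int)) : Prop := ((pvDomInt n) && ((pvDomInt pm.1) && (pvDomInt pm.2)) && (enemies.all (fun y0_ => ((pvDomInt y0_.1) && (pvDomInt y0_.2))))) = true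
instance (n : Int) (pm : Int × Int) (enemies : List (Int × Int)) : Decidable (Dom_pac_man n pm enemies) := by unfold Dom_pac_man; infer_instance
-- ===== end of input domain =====

-- B replaces A's single fused loop over four mutable extrema by a sort of each
-- coordinate axis followed by binary search (two bisection loops per axis) for
-- the nearest enemy coordinates around pac-man; objective: alternative.

-- ===== PORT A =====
-- loop body of A: the two if/elif chains updating the four bounds, in order
def pacStepA (px py : Int) (s : Int × Int × Int × Int) (e : Int × Int) : Int × Int × Int × Int :=
  let xl := s.1; let xh := s.2.1; let yl := s.2.2.1; let yh := s.2.2.2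
  let px' : Int × Int :=
    if xl < e.1 ∧ e.1 < px then (e.1, xh)
    else if xh > e.1 ∧ e.1 > px then (xl, e.1)
    else (xl, xh)
  let py' : Int × Int :=
    if yl < e.2 ∧ e.2 < py then (e.2, yh)
    else if yh > e.2 ∧ e.2 > py then (yl, e.2)
    else (yl, yh)
  (px'.1, px'.2, py'.1, py'.2)

def pac_man (n : Int) (pm : Int × Int) (enemies : List (Int × Int)) : Int :=
  let st := enemies.foldl (pacStepA pm.1 pm.2) (-1, n, -1, n)
  (st.2.1 - (st.1 + 1)) * (st.2.2.2 - (st.2.2.1 + 1)) - 1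

-- ===== PORT B =====
-- one bisection 'while lo < hi' loop of Source B; p is the branch test on vs[mid]
-- (p = (· < c) for the first loop, p = (· ≤ c) for the second); vs[mid] is
-- always in range when hi ≤ len vs, so getD matches Python's vs[mid] exactly
def pacBisect (p : Int → Bool) (vs : List Int) (lo hi : Nat) : Nat :=
  if lo < hi then
    let mid := (lo + hi) / 2
    if p (vs.getD mid 0) then pacBisect p vs (mid + 1) hi else pacBisect p vs lo mid
  else lo
termination_by hi - lo
decreasing_by all_goals omega

-- Source B's _bounds: sort once, then two binary searches
def pacBounds (n c : Int) (vals : List Int) : Int × Int :=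
  let vs := PySem.List.sorted vals (fun x => x)
  let lo := pacBisect (fun y => decide (y < c)) vs 0 vs.length
  let low := if 0 < lo then vs.getD (lo - 1) 0 else -1
  let lo2 := pacBisect (fun y => decide (y ≤ c)) vs 0 vs.length
  let high := if lo2 < vs.length then vs.getD lo2 0 else n
  (max (-1) low, min n high)

def pac_man_alt (n : Int) (pm : Int × Int) (enemies : List (Int × Int)) : Int :=
  let bx := pacBounds n pm.1 (enemies.map Prod.fst)
  let by_ := pacBounds n pm.2 (enemies.map Prod.snd)
  (bx.2 - (bx.1 + 1)) * (by_.2 - (by_.1 + 1)) - 1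

-- ===== PRECONDITION & SPEC =====
def Spec_pac_man (n : Int) (pm : Int × Int) (enemies : List (Int × Int)) (out : Int) : Prop := out = pac_man_alt n pm enemies
instance (n : Int) (pm : Int × Int) (enemies : List (Int × Int)) (out : Int) : Decidable (Spec_pac_man n pm enemies out) := by unfold Spec_pac_man; infer_instance

-- ===== CLAIM (what is proved, stated in full; the proofs are below) =====
def Claim_equal_pac_man : Prop := ∀ (n : Int) (pm : Int × Int) (enemies : List (Int × Int)), Dom_pac_man n pm enemies → Spec_pac_man n pm enemies (pac_man n pm enemies)

-- ===== LEMMAS AND PROOFS =====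

-- ---- A side: the fused loop computes four filtered max/min folds ----

lemma pacStepA_eq (px py : Int) (n : Int) (xl xh yl yh : Int) (e : Int × Int)
    (hxl : -1 ≤ xl) (hxh : xh ≤ n) (hyl : -1 ≤ yl) (hyh : yh ≤ n) :
    pacStepA px py (xl, xh, yl, yh) e =
      ((if -1 < e.1 ∧ e.1 < px then max xl e.1 else xl),
       (if px < e.1 ∧ e.1 < n then min xh e.1 else xh),
       (if -1 < e.2 ∧ e.2 < py then max yl e.2 else yl),
       (if py < e.2 ∧ e.2 < n then min yh e.2 else yh)) := by
  simp only [pacStepA, Prod.ext_iff, apply_ite (Prod.fst (α := Int) (β := Int)),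
    apply_ite (Prod.snd (α := Int) (β := Int))]
  refine ⟨?_, ?_, ?_, ?_⟩ <;> split_ifs <;> omega

lemma pac_loop_eq (px py n : Int) (es : List (Int × Int)) :
    ∀ (xl xh yl yh : Int), -1 ≤ xl → xh ≤ n → -1 ≤ yl → yh ≤ n →
    es.foldl (pacStepA px py) (xl, xh, yl, yh) =
      (((es.map Prod.fst).filter (fun x => decide (-1 < x ∧ x < px))).foldl max xl,
       ((es.map Prod.fst).filter (fun x => decide (px < x ∧ x < n))).foldl min xh,
       ((es.map Prod.snd).filter (fun y => decide (-1 < y ∧ y < py))).foldl max yl,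
       ((es.map Prod.snd).filter (fun y => decide (py < y ∧ y < n))).foldl min yh) := by
  induction es with
  | nil => simp
  | cons e es ih =>
    intro xl xh yl yh hxl hxh hyl hyh
    rw [List.foldl_cons, pacStepA_eq px py n xl xh yl yh e hxl hxh hyl hyh]
    rw [ih (if -1 < e.1 ∧ e.1 < px then max xl e.1 else xl)
           (if px < e.1 ∧ e.1 < n then min xh e.1 else xh)
           (if -1 < e.2 ∧ e.2 < py then max yl e.2 else yl)
           (if py < e.2 ∧ e.2 < n then min yh e.2 else yh)
           (by split_ifs <;> omega) (by split_ifs <;> omega)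
           (by split_ifs <;> omega) (by split_ifs <;> omega)]
    simp only [List.map_cons, List.filter_cons, Prod.ext_iff]
    refine ⟨?_, ?_, ?_, ?_⟩
    · by_cases h : -1 < e.1 ∧ e.1 < px <;> simp [h]
    · by_cases h : px < e.1 ∧ e.1 < n <;> simp [h]
    · by_cases h : -1 < e.2 ∧ e.2 < py <;> simp [h]
    · by_cases h : py < e.2 ∧ e.2 < n <;> simp [h]

-- ---- B side: correctness of the bisection loop ----

lemma sorted_getD_mono {vs : List Int} (hs : vs.Pairwise (· ≤ ·)) {i j : Nat}
    (hij : i ≤ j) (hj : j < vs.length) : vs.getD i 0 ≤ vs.getD j 0 := by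
  rcases Nat.lt_or_ge i j with h | h
  · rw [List.getD_eq_getElem vs 0 (lt_trans h hj), List.getD_eq_getElem vs 0 hj]
    exact List.pairwise_iff_getElem.mp hs i j _ _ h
  · have : i = j := le_antisymm hij h
    subst this; rfl

-- a unique index r with 'true below, false at and above' is the takeWhile length
lemma takeWhile_length_unique (p : Int → Bool) :
    ∀ (vs : List Int) (r : Nat), r ≤ vs.length →
    (∀ i (_ : i < vs.length), i < r → p (vs.getD i 0) = true) →
    (∀ i (_ : i < vs.length), r ≤ i → p (vs.getD i 0) = false) →
    r = (vs.takeWhile p).length := by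
  intro vs
  induction vs with
  | nil => intro r hr _ _; simpa using Nat.le_zero.mp hr
  | cons a t ih =>
    intro r hr h1 h2
    cases r with
    | zero =>
      have h0 := h2 0 (by simp) (Nat.zero_le _)
      rw [List.getD_cons_zero] at h0
      simp [List.takeWhile_cons, h0]
    | succ r' =>
      have ha := h1 0 (by simp) (Nat.succ_pos _)
      rw [List.getD_cons_zero] at ha
      simp only [List.takeWhile_cons, ha, if_true, List.length_cons]
      have := ih r' (by simpa using hr)
        (fun i hi hir => by
          have := h1 (i+1) (by simpa using hi) (by omega)
          rwa [List.getD_cons_succ] at this)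
        (fun i hi hir => by
          have := h2 (i+1) (by simpa using hi) (by omega)
          rwa [List.getD_cons_succ] at this)
      omega

lemma pacBisect_spec (p : Int → Bool) (vs : List Int) (hs : vs.Pairwise (· ≤ ·))
    (hmono : ∀ x y : Int, x ≤ y → p y = true → p x = true) :
    ∀ (fuel lo hi : Nat), hi - lo ≤ fuel → lo ≤ hi → hi ≤ vs.length →
    (∀ i (_ : i < vs.length), i < lo → p (vs.getD i 0) = true) →
    (∀ i (_ : i < vs.length), hi ≤ i → p (vs.getD i 0) = false) →
    pacBisect p vs lo hi = (vs.takeWhile p).length := by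
  intro fuel
  induction fuel with
  | zero =>
    intro lo hi hf hlh hhl h1 h2
    have : lo = hi := by omega
    subst this
    rw [pacBisect]; simp only [lt_irrefl, if_false]
    exact takeWhile_length_unique p vs lo hhl h1 (fun i hi' hli => h2 i hi' hli)
  | succ fuel ih =>
    intro lo hi hf hlh hhl h1 h2
    rw [pacBisect]
    by_cases hlt : lo < hi
    · simp only [hlt, if_true]
      have hmid1 : lo ≤ (lo + hi) / 2 := by omega
      have hmid2 : (lo + hi) / 2 < hi := by omega
      have hmidlen : (lo + hi) / 2 < vs.length := by omega
      by_cases hp : p (vs.getD ((lo + hi) / 2) 0) = true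
      · simp only [hp, if_true]
        exact ih ((lo + hi) / 2 + 1) hi (by omega) (by omega) hhl
          (fun i hi' hir => hmono _ _ (sorted_getD_mono hs (by omega) hmidlen) hp)
          h2
      · simp only [hp, if_false]
        refine ih lo ((lo + hi) / 2) (by omega) (by omega) (by omega) h1 ?_
        intro i hi' hmi
        by_contra hcon
        exact hp (hmono _ _ (sorted_getD_mono hs hmi hi') (by simpa using hcon))
    · simp only [hlt, if_false]
      have : lo = hi := by omega
      subst this
      exact takeWhile_length_unique p vs lo hhl h1 (fun i hi' hli => h2 i hi' hli)

-- on a sorted list, filtering a downward-closed predicate is a takeWhile,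
-- and the rest of the list is exactly the filter of the complement
lemma sorted_filter_eq_takeWhile (p : Int → Bool)
    (hmono : ∀ x y : Int, x ≤ y → p y = true → p x = true) :
    ∀ (vs : List Int), vs.Pairwise (· ≤ ·) → vs.filter p = vs.takeWhile p := by
  intro vs
  induction vs with
  | nil => intro _; rfl
  | cons a t ih =>
    intro hp
    rw [List.pairwise_cons] at hp
    by_cases ha : p a = true
    · simp [List.filter_cons, List.takeWhile_cons, ha, ih hp.2]
    · simp only [List.filter_cons, List.takeWhile_cons, ha, if_false, Bool.false_eq_true]
      exact List.filter_eq_nil_iff.mpr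
        (fun x hx hpx => ha (hmono a x (hp.1 x hx) hpx))

lemma sorted_filter_not_eq_dropWhile (p q : Int → Bool)
    (hq : ∀ x : Int, q x = !p x)
    (hmono : ∀ x y : Int, x ≤ y → p y = true → p x = true) :
    ∀ (vs : List Int), vs.Pairwise (· ≤ ·) → vs.filter q = vs.dropWhile p := by
  intro vs
  induction vs with
  | nil => intro _; rfl
  | cons a t ih =>
    intro hp
    rw [List.pairwise_cons] at hp
    by_cases ha : p a = true
    · simp [List.filter_cons, List.dropWhile_cons, ha, hq a, ih hp.2]
    · have hpa : p a = false := by revert ha; cases p a <;> simp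
      have hft : t.filter q = t := List.filter_eq_self.mpr
        (fun x hx => by
          rw [hq x]
          by_contra hc
          exact absurd (hmono a x (hp.1 x hx) (by revert hc; cases p x <;> simp))
            (by simp [hpa]))
      simp [List.filter_cons, List.dropWhile_cons, hpa, hq a, hft]

-- folding max over a sorted nonempty list yields max of seed and last element
lemma foldl_max_sorted : ∀ (t : List Int), t.Pairwise (· ≤ ·) → ∀ (a : Int) (h : t ≠ []),
    t.foldl max a = max a (t.getLast h) := by
  intro t
  induction t with
  | nil => intro _ a h; exact absurd rfl h
  | cons x t' ih =>
    intro hp a h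
    rw [List.pairwise_cons] at hp
    cases t' with
    | nil => simp
    | cons y t'' =>
      have hne : (y :: t'') ≠ [] := by simp
      rw [List.foldl_cons, ih hp.2 (max a x) hne]
      rw [show (x :: y :: t'').getLast h = (y :: t'').getLast hne from
        List.getLast_cons hne]
      have hx : x ≤ (y :: t'').getLast hne := hp.1 _ (List.getLast_mem hne)
      omega

lemma foldl_min_sorted : ∀ (t : List Int), t.Pairwise (· ≤ ·) → ∀ (a : Int) (h : t ≠ []),
    t.foldl min a = min a (t.head h) := by
  intro t
  induction t with
  | nil => intro _ a h; exact absurd rfl h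
  | cons x t' ih =>
    intro hp a h
    rw [List.pairwise_cons] at hp
    cases t' with
    | nil => simp
    | cons y t'' =>
      have hne : (y :: t'') ≠ [] := by simp
      rw [List.foldl_cons, ih hp.2 (min a x) hne]
      simp only [List.head_cons]
      have hx : x ≤ y := hp.1 _ List.mem_cons_self
      omega

-- the window bounds -1 < x and x < n can be dropped under the -1 / n seeds
lemma foldl_max_trim (c : Int) : ∀ (l : List Int) (a : Int), -1 ≤ a →
    (l.filter (fun x => decide (-1 < x ∧ x < c))).foldl max a =
    (l.filter (fun x => decide (x < c))).foldl max a := by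
  intro l
  induction l with
  | nil => intro a _; rfl
  | cons x t ih =>
    intro a ha
    simp only [List.filter_cons]
    by_cases h1 : x < c
    · by_cases h2 : -1 < x
      · simp only [h1, h2, and_self, decide_true, if_true, decide_eq_true_eq]
        simp only [true_and, h1, decide_true, if_true, List.foldl_cons]
        exact ih (max a x) (by omega)
      · have hax : max a x = a := by omega
        simp only [decide_eq_true_eq, h2, false_and, if_false, h1, decide_true, if_true,
          List.foldl_cons, hax]
        exact ih a ha
    · simp only [decide_eq_true_eq, h1, and_false, if_false]
      exact ih a ha

lemma foldl_min_trim (c n : Int) : ∀ (l : List Int) (a : Int), a ≤ n →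
    (l.filter (fun x => decide (c < x ∧ x < n))).foldl min a =
    (l.filter (fun x => decide (c < x))).foldl min a := by
  intro l
  induction l with
  | nil => intro a _; rfl
  | cons x t ih =>
    intro a ha
    simp only [List.filter_cons]
    by_cases h1 : c < x
    · by_cases h2 : x < n
      · simp only [decide_eq_true_eq, h1, h2, and_self, if_true, List.foldl_cons]
        exact ih (min a x) (by omega)
      · have hax : min a x = a := by omega
        simp only [decide_eq_true_eq, h1, h2, and_false, if_false, true_and, if_true,
          List.foldl_cons, hax]
        exact ih a ha
    · simp only [decide_eq_true_eq, h1, false_and, and_false, if_false]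
      exact ih a ha

-- the per-axis bounds of B equal the two filtered folds of A
lemma pacBounds_eq (n c : Int) (l : List Int) :
    pacBounds n c l =
      ((l.filter (fun x => decide (-1 < x ∧ x < c))).foldl max (-1),
       (l.filter (fun x => decide (c < x ∧ x < n))).foldl min n) := by
  have hperm : (PySem.List.sorted l (fun x => x)).Perm l := PySem.List.sorted_perm l _ _
  have hs : (PySem.List.sorted l (fun x => x)).Pairwise (· ≤ ·) := by
    have := PySem.List.sorted_pairwise l (fun x => x)
    simpa using this
  set vs := PySem.List.sorted l (fun x => x) with hvs
  have hmlt : ∀ x y : Int, x ≤ y → decide (y < c) = true → decide (x < c) = true := by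
    intro x y h hy; simp at hy ⊢; omega
  have hmle : ∀ x y : Int, x ≤ y → decide (y ≤ c) = true → decide (x ≤ c) = true := by
    intro x y h hy; simp at hy ⊢; omega
  -- the two bisection results
  have hk1 : pacBisect (fun y => decide (y < c)) vs 0 vs.length =
      (vs.takeWhile (fun y => decide (y < c))).length :=
    pacBisect_spec _ vs hs hmlt vs.length 0 vs.length (by omega) (by omega) le_rfl
      (fun i _ h => by omega) (fun i hi h => by omega)
  have hk2 : pacBisect (fun y => decide (y ≤ c)) vs 0 vs.length =
      (vs.takeWhile (fun y => decide (y ≤ c))).length :=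
    pacBisect_spec _ vs hs hmle vs.length 0 vs.length (by omega) (by omega) le_rfl
      (fun i _ h => by omega) (fun i hi h => by omega)
  set t := vs.takeWhile (fun y => decide (y < c)) with ht
  set d := vs.dropWhile (fun y => decide (y ≤ c)) with hd
  have htp : t.Pairwise (· ≤ ·) := hs.sublist (List.takeWhile_prefix _).sublist
  have hdp : d.Pairwise (· ≤ ·) := hs.sublist (List.dropWhile_sublist _)
  -- the two folds, rewritten onto the sorted list
  have hmaxfold : (l.filter (fun x => decide (-1 < x ∧ x < c))).foldl max (-1) =
      t.foldl max (-1) := by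
    rw [← (hperm.filter _).foldl_eq (-1), foldl_max_trim c vs (-1) le_rfl,
      sorted_filter_eq_takeWhile _ hmlt vs hs]
  have hminfold : (l.filter (fun x => decide (c < x ∧ x < n))).foldl min n =
      d.foldl min n := by
    rw [← (hperm.filter _).foldl_eq n, foldl_min_trim c n vs n le_rfl,
      sorted_filter_not_eq_dropWhile (fun y => decide (y ≤ c)) (fun y => decide (c < y))
        (fun x => by by_cases h : x ≤ c <;> simp [h] <;> omega) hmle vs hs]
  simp only [pacBounds, ← hvs, hk1, hk2, Prod.ext_iff]
  constructor
  · -- low component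
    rw [hmaxfold]
    by_cases hne : t = []
    · simp [hne, ← ht]
    · have hpos : 0 < t.length := List.length_pos_of_ne_nil hne
      have hpre : t <+: vs := ht ▸ List.takeWhile_prefix _
      have hlen : t.length - 1 < vs.length := by
        have := hpre.length_le; omega
      have hlast : vs.getD (t.length - 1) 0 = t.getLast hne := by
        rw [List.getD_eq_getElem vs 0 hlen, List.getLast_eq_getElem hne]
        exact (hpre.getElem (by omega)).symm
      rw [if_pos hpos, hlast, foldl_max_sorted t htp (-1) hne]
  · -- high component
    rw [hminfold]
    have hlen2 : (vs.takeWhile (fun y => decide (y ≤ c))).length + d.length = vs.length := by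
      conv_rhs => rw [← List.takeWhile_append_dropWhile
        (p := fun y => decide (y ≤ c)) (l := vs)]
      rw [← hd, List.length_append]
    by_cases hne : d = []
    · have : ¬ (vs.takeWhile (fun y => decide (y ≤ c))).length < vs.length := by
        simp [hne] at hlen2; omega
      simp [this, hne, ← hd]
    · have hdl : 0 < d.length := List.length_pos_of_ne_nil hne
      have hlt : (vs.takeWhile (fun y => decide (y ≤ c))).length < vs.length := by omega
      have happ : vs.takeWhile (fun y => decide (y ≤ c)) ++ d = vs := by
        rw [hd]; exact List.takeWhile_append_dropWhile
      have hdrop := List.drop_left (l₁ := vs.takeWhile (fun y => decide (y ≤ c))) (l₂ := d)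
      rw [happ] at hdrop
      have hhead : vs.getD (vs.takeWhile (fun y => decide (y ≤ c))).length 0 = d.head hne := by
        rw [List.getD_eq_getElem vs 0 hlt, List.head_eq_getElem hne]
        rw [← List.getElem_of_eq hdrop (by rw [hdrop]; simpa using hdl)]
        rw [List.getElem_drop]
        simp
      rw [if_pos hlt, hhead, foldl_min_sorted d hdp n hne]

-- ===== VERDICT (by name: the statement is the Claim_ definition above) =====
theorem pac_man_spec : Claim_equal_pac_man := by
  intro n pm enemies _
  show pac_man n pm enemies = pac_man_alt n pm enemies
  simp only [pac_man, pac_man_alt]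
  rw [pac_loop_eq pm.1 pm.2 n enemies (-1) n (-1) n le_rfl le_rfl le_rfl le_rfl,
    pacBounds_eq n pm.1 (enemies.map Prod.fst), pacBounds_eq n pm.2 (enemies.map Prod.snd)]
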